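-- pv_equiv track=rewrite | github.com/nayoon-kim/Algorithm | 2.py | solution
-- ===== SOURCE A (Python) =====
-- def solution(n):
--     answer = 0
--     num = [1]
--     three = 1
--     while True:
--         if len(num) > n:
--             break
--         three *= 3
--         num.append(three)
--         temp = num
--         for i in range(0, len(temp) - 1):
--             num.append(temp[i]+three)
--
--     answer = num[n - 1]
--     return answer
-- ===== SOURCE B (Python) =====
-- def solution(n):
--     answer = 0
--     power = 1
--     while n > 0:
--         if n % 2:
--             answer += power
--         n //= 2
--         power *= 3
--     return answer
-- ===== Notes on version B (the rewrite author's own statement) =====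
-- stated objective: faster
-- what changed: Instead of generating the whole list of the first ~2n sum-of-distinct-powers-of-3 numbers level by level and indexing it, B computes the n-th term directly by reading n's binary digits as base-3 digits (one loop over the bits of n).
-- intended difference: For n = 0, A returns 1 only because num[n-1] wraps around to the last element via Python's negative indexing; B returns 0, the empty sum, which is the natural value for a degenerate index before the first term. — e.g. on solution(0): A returns 1, B returns 0
import Mathlib
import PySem

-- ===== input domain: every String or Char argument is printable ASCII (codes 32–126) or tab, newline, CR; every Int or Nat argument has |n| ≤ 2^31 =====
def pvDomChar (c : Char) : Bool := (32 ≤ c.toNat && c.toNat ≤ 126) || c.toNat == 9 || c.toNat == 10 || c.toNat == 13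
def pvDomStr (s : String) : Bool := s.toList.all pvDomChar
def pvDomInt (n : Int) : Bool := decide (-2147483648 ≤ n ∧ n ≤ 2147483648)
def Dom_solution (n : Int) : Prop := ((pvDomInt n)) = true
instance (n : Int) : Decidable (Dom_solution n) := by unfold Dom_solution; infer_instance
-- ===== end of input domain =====

-- B computes the n-th term directly from n's binary digits instead of building the
-- whole list of the first ~2n terms (measured asymptotic speed-up).

-- ===== PORT A =====
-- length of a fold that appends one element per index (cited by solLoopA's decreasing_by)
theorem foldl_app_one_length (l : List Int) (init : List Int) (g : List Int → Int → Int) :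
    (l.foldl (fun acc i => acc ++ [g acc i]) init).length = init.length + l.length := by
  induction l generalizing init with
  | nil => simp
  | cons x xs ih => simp [List.foldl, ih]; omega

-- hand-built arithmetic helpers kept omega-free so the ports' proof closures stay small
theorem toNat_sub_lt (n : Int) (a b : Nat) (hab : a < b) (hle : (a : Int) ≤ n) :
    (n + 1 - (b : Int)).toNat < (n + 1 - (a : Int)).toNat :=
  (Int.toNat_lt_toNat (Int.sub_pos.mpr (Int.lt_add_one_iff.mpr hle))).mpr
    (sub_lt_sub_left (by exact_mod_cast hab) _)

-- measure decrease for solLoopA's while loop (cited by its decreasing_by)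
theorem solLoopA_dec (n : Int) (num : List Int) (three' : Int) (h : ¬ ((num.length : Int) > n)) :
    (n + 1 - (((PySem.List.pyRange 0 (((num ++ [three']).length : Int) - 1) 1).foldl
        (fun acc i => acc ++ [PySem.List.pyGetD acc i 0 + three']) (num ++ [three'])).length : Int)).toNat
      < (n + 1 - (num.length : Int)).toNat := by
  rw [foldl_app_one_length, PySem.List.length_pyRange_one]
  have h1 : (num ++ [three']).length = num.length + 1 := by rw [List.length_append, List.length_singleton]
  rw [h1]
  have h2 : (((num.length + 1 : Nat) : Int) - 1 - 0).toNat = num.length := by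
    rw [sub_zero, Nat.cast_add, Nat.cast_one, add_sub_cancel_right, Int.toNat_natCast]
  rw [h2]
  exact toNat_sub_lt n num.length (num.length + 1 + num.length)
    (Nat.lt_add_right _ (Nat.lt_succ_self _)) (Int.not_lt.mp h)

-- the 'while True' loop of A: state (num, three); the inner 'for i in range(...)' is the foldl
def solLoopA (n : Int) (num : List Int) (three : Int) : List Int :=
  if _h : (num.length : Int) > n then num
  else
    let three' := three * 3
    let num1 := num ++ [three']
    let num2 := (PySem.List.pyRange 0 ((num1.length : Int) - 1) 1).foldl
        (fun acc i => acc ++ [PySem.List.pyGetD acc i 0 + three']) num1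
    solLoopA n num2 three'
termination_by (n + 1 - num.length).toNat
decreasing_by exact solLoopA_dec n num (three * 3) _h

def solution (n : Int) : Int :=
  PySem.List.pyGetD (solLoopA n [1] 1) (n - 1) 0

-- ===== PORT B =====
-- measure decrease for altLoopB (cited by its decreasing_by)
theorem altLoopB_dec (n : Int) (h : n > 0) : (PySem.Int.floordiv n 2).toNat < n.toNat := by
  rw [PySem.Int.floordiv_eq_ediv_of_pos two_pos]
  exact (Int.toNat_lt_toNat h).mpr
    ((Int.ediv_lt_iff_lt_mul two_pos).mpr (lt_mul_of_one_lt_right h one_lt_two))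

def altLoopB (n answer power : Int) : Int :=
  if n > 0 then
    altLoopB (PySem.Int.floordiv n 2)
      (if PySem.Int.mod n 2 ≠ 0 then answer + power else answer) (power * 3)
  else answer
termination_by n.toNat
decreasing_by exact altLoopB_dec n (by assumption)

def solution_alt (n : Int) : Int := altLoopB n 0 1

-- ===== PRECONDITION & SPEC =====
-- Pre_ excludes n < 0, on which A raises IndexError (num[n - 1] out of range).
def Pre_solution (n : Int) : Prop := 0 ≤ n
instance (n : Int) : Decidable (Pre_solution n) := by unfold Pre_solution; infer_instance
def pvWitness_solution : Int := 5

-- For n = 0, A returns 1 only because num[n-1] wraps to the last element via negative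
-- indexing; B returns 0, the empty sum, the natural value for an index before the first term.
def D_solution (n : Int) : Prop := n = 0
instance (n : Int) : Decidable (D_solution n) := by unfold D_solution; infer_instance

def Spec_solution (n : Int) (out : Int) : Prop := ¬ D_solution n → out = solution_alt n
instance (n : Int) (out : Int) : Decidable (Spec_solution n out) := by unfold Spec_solution; infer_instance

def pvDiffWitness_solution : Int := 0
def pvDiffWitnessOut_solution : Int × Int := (1, 0)

-- ===== CLAIM (what is proved, stated in full; the proofs are below) =====
def Claim_unchanged_solution : Prop := ∀ (n : Int), Dom_solution n → Pre_solution n → Spec_solution n (solution n)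
def Claim_changed_solution : Prop := Dom_solution (pvDiffWitness_solution) ∧ Pre_solution (pvDiffWitness_solution) ∧ D_solution (pvDiffWitness_solution) ∧ solution (pvDiffWitness_solution) = pvDiffWitnessOut_solution.1 ∧ solution_alt (pvDiffWitness_solution) = pvDiffWitnessOut_solution.2 ∧ pvDiffWitnessOut_solution.1 ≠ pvDiffWitnessOut_solution.2
def Claim_exact_solution : Prop := ∀ (n : Int), Dom_solution n → Pre_solution n → D_solution n → solution n ≠ solution_alt n

-- ===== LEMMAS AND PROOFS =====

-- f m = the number obtained by reading m's binary digits as base-3 digits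
def fB : Nat → Int
  | 0 => 0
  | (m+1) => 3 * fB ((m+1)/2) + (((m+1) % 2 : Nat) : Int)
decreasing_by omega

theorem fB_zero : fB 0 = 0 := by rw [fB]

theorem fB_rec (m : Nat) : fB m = 3 * fB (m/2) + ((m % 2 : Nat) : Int) := by
  cases m with
  | zero => simp [fB_zero]
  | succ k => rw [fB]

theorem fB_one : fB 1 = 1 := by rw [fB_rec]; norm_num [fB_zero]

theorem fB_pow_add : ∀ (j m : Nat), m < 2^j → fB (2^j + m) = 3^j + fB m := by
  intro j
  induction j with
  | zero =>
    intro m hm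
    interval_cases m
    simp [fB_one, fB_zero]
  | succ j ih =>
    intro m hm
    rw [fB_rec (2^(j+1) + m)]
    have h2 : 2^(j+1) = 2 * 2^j := by ring
    have hdiv : (2^(j+1) + m) / 2 = 2^j + m/2 := by omega
    have hmod : (2^(j+1) + m) % 2 = m % 2 := by omega
    have hlt : m / 2 < 2^j := by omega
    rw [hdiv, hmod, ih _ hlt, fB_rec m]
    ring

theorem altLoopB_spec : ∀ (m : Nat) (n a p : Int), 0 ≤ n → n.toNat = m →
    altLoopB n a p = a + p * fB m := by
  intro m
  induction m using Nat.strong_induction_on with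
  | _ m ih =>
    intro n a p hn hm
    rw [altLoopB]
    by_cases hpos : n > 0
    · simp only [if_pos hpos]
      have hfd : PySem.Int.floordiv n 2 = n / 2 := PySem.Int.floordiv_eq_ediv_of_pos (by omega)
      have hmd : PySem.Int.mod n 2 = n % 2 := PySem.Int.mod_eq_emod_of_pos (by omega)
      have h2 : (n / 2).toNat = m / 2 := by omega
      have hlt : m / 2 < m := by omega
      rw [hfd, hmd, ih (m/2) hlt (n/2) _ (p*3) (by omega) h2]
      rw [fB_rec m]
      by_cases hodd : n % 2 ≠ 0
      · rw [if_pos hodd]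
        have : ((m % 2 : Nat) : Int) = 1 := by omega
        rw [this]; ring
      · rw [if_neg hodd]
        have : ((m % 2 : Nat) : Int) = 0 := by omega
        rw [this]; ring
    · have hz : n = 0 := by omega
      have hm0 : m = 0 := by omega
      simp [hpos, hm0, fB_zero]

-- the inner for-loop of A: reading indices below num1.length while appending
theorem foldl_idx_spec (num1 : List Int) (t : Int) :
    ∀ (d lo : Nat) (e : List Int), lo + d ≤ num1.length →
    (PySem.List.pyRange (lo : Int) ((lo : Int) + (d : Int)) 1).foldl
        (fun acc i => acc ++ [PySem.List.pyGetD acc i 0 + t]) (num1 ++ e)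
      = num1 ++ e ++ (((num1.drop lo).take d).map (· + t)) := by
  intro d
  induction d with
  | zero =>
    intro lo e _
    simp
  | succ d ih =>
    intro lo e hle
    have hcons : PySem.List.pyRange (lo : Int) ((lo : Int) + ((d : Int) + 1)) 1
        = (lo : Int) :: PySem.List.pyRange ((lo : Int) + 1) ((lo : Int) + ((d : Int) + 1)) 1 :=
      PySem.List.pyRange_one_cons (by omega)
    have hlo : lo < num1.length := by omega
    have hget : PySem.List.pyGetD (num1 ++ e) (lo : Int) 0 = num1[lo] := by
      rw [PySem.List.pyGetD_natCast]
      rw [List.getD_append _ _ _ _ hlo, List.getD_eq_getElem _ _ hlo]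
    have hstep : ((lo : Int) + 1) = ((lo + 1 : Nat) : Int) := by push_cast; ring
    have harg : ((lo : Int) + ((d : Int) + 1)) = ((lo + 1 : Nat) : Int) + (d : Int) := by
      push_cast; ring
    have hdrop : num1.drop lo = num1[lo] :: num1.drop (lo + 1) := (List.getElem_cons_drop hlo).symm
    calc (PySem.List.pyRange (lo : Int) ((lo : Int) + ((d : Int) + 1)) 1).foldl
            (fun acc i => acc ++ [PySem.List.pyGetD acc i 0 + t]) (num1 ++ e)
        = (PySem.List.pyRange ((lo + 1 : Nat) : Int) (((lo + 1 : Nat) : Int) + (d : Int)) 1).foldl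
            (fun acc i => acc ++ [PySem.List.pyGetD acc i 0 + t])
            (num1 ++ (e ++ [num1[lo] + t])) := by
          rw [hcons]
          simp only [List.foldl_cons, hget, hstep, harg, List.append_assoc]
      _ = num1 ++ (e ++ [num1[lo] + t]) ++ (((num1.drop (lo+1)).take d).map (· + t)) :=
          ih (lo + 1) (e ++ [num1[lo] + t]) (by omega)
      _ = num1 ++ e ++ (((num1.drop lo).take (d+1)).map (· + t)) := by
          have hlo' : lo < (num1.map (· + t)).length := by simpa using hlo
          have hdm : (num1.map (· + t)).drop lo
              = (num1[lo] + t) :: (num1.map (· + t)).drop (lo + 1) := by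
            rw [← List.getElem_cons_drop hlo', List.getElem_map]
          simp [List.map_take, List.map_drop, hdm]

-- one iteration of A's while loop rewrites the state as append + map
theorem step_eq (num : List Int) (t' : Int) :
    ((PySem.List.pyRange 0 (((num ++ [t']).length : Int) - 1) 1).foldl
        (fun acc i => acc ++ [PySem.List.pyGetD acc i 0 + t']) (num ++ [t']))
      = (num ++ [t']) ++ num.map (· + t') := by
  have h := foldl_idx_spec (num ++ [t']) t' num.length 0 [] (by simp)
  simp only [Nat.cast_zero, zero_add, List.append_nil, List.drop_zero] at h
  have hlen : (((num ++ [t']).length : Int) - 1) = (num.length : Int) := by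
    simp only [List.length_append, List.length_cons, List.length_nil]
    push_cast; ring
  rw [hlen, h, List.take_left']
  simp

-- the elements after one iteration are again fB 1, fB 2, …
theorem step_elem (num : List Int) (k : Nat)
    (hklen : num.length + 1 = 2^(k+1))
    (helem : ∀ i : Nat, i < num.length → num.getD i 0 = fB (i+1)) :
    ∀ i : Nat, i < ((num ++ [(3:Int)^(k+1)]) ++ num.map (· + (3:Int)^(k+1))).length →
      ((num ++ [(3:Int)^(k+1)]) ++ num.map (· + (3:Int)^(k+1))).getD i 0 = fB (i+1) := by
  intro i hi
  simp only [List.length_append, List.length_map, List.length_cons, List.length_nil] at hi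
  by_cases h1 : i < num.length
  · rw [List.getD_append _ _ _ _ (by simp; omega), List.getD_append _ _ _ _ h1]
    exact helem i h1
  · by_cases h2 : i = num.length
    · subst h2
      rw [List.getD_append _ _ _ _ (by simp), List.getD_append_right _ _ _ _ (le_refl _)]
      simp only [Nat.sub_self, List.getD_cons_zero]
      have : num.length + 1 = 2^(k+1) + 0 := by omega
      rw [this, fB_pow_add (k+1) 0 (by positivity), fB_zero]
      ring
    · have hj : num.length + 1 ≤ i := by omega
      rw [List.getD_append_right _ _ _ _ (by simp; omega)]
      have hlen1 : (num ++ [(3:Int)^(k+1)]).length = num.length + 1 := by simp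
      rw [hlen1]
      set j := i - (num.length + 1) with hjdef
      have hjlt : j < num.length := by omega
      rw [List.getD_eq_getElem _ _ (by simpa using hjlt), List.getElem_map]
      have he := helem j hjlt
      rw [List.getD_eq_getElem _ _ hjlt] at he
      rw [he]
      have hieq : i + 1 = 2^(k+1) + (j + 1) := by omega
      rw [hieq, fB_pow_add (k+1) (j+1) (by omega)]
      ring

-- loop invariant for A's while loop
theorem solLoopA_inv (n : Int) : ∀ (M : Nat) (num : List Int) (three : Int),
    (n + 1 - num.length).toNat = M →
    (∃ k : Nat, three = 3^k ∧ num.length + 1 = 2^(k+1)) →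
    (∀ i : Nat, i < num.length → num.getD i 0 = fB (i+1)) →
    n < ((solLoopA n num three).length : Int) ∧
      ∀ i : Nat, i < (solLoopA n num three).length →
        (solLoopA n num three).getD i 0 = fB (i+1) := by
  intro M
  induction M using Nat.strong_induction_on with
  | _ M ih =>
    intro num three hM hk helem
    obtain ⟨k, hk3, hklen⟩ := hk
    by_cases hgt : (num.length : Int) > n
    · rw [solLoopA.eq_def, dif_pos hgt]
      exact ⟨hgt, helem⟩
    · rw [solLoopA.eq_def, dif_neg hgt]
      simp only [step_eq]
      have h3 : three * 3 = (3:Int)^(k+1) := by rw [hk3]; ring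
      rw [h3]
      set num2 := (num ++ [(3:Int)^(k+1)]) ++ num.map (· + (3:Int)^(k+1)) with hnum2
      have hlen2 : num2.length = 2 * num.length + 1 := by
        simp only [hnum2, List.length_append, List.length_map, List.length_cons,
          List.length_nil]
        omega
      apply ih ((n + 1 - num2.length).toNat) _ num2 ((3:Int)^(k+1)) rfl
      · refine ⟨k+1, rfl, ?_⟩
        have h2p : 2^(k+1+1) = 2*2^(k+1) := by ring
        rw [hlen2, h2p, ← hklen]
        omega
      · exact step_elem num k hklen helem
      · rw [hlen2]
        omega

theorem solution_eval_pos (n : Int) (hn : 1 ≤ n) : solution n = fB n.toNat := by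
  unfold solution
  have hinv := solLoopA_inv n (n + 1 - 1).toNat [1] 1 (by norm_num) ⟨0, by norm_num, by norm_num⟩
    (by intro i hi
        have : i = 0 := by simpa using hi
        simp [this, fB_one])
  obtain ⟨hlen, helem⟩ := hinv
  have h0 : (0:Int) ≤ n - 1 := by omega
  have h1 : n - 1 < ((solLoopA n [1] 1).length : Int) := by omega
  rw [PySem.List.pyGetD_eq_getElem _ _ h0 h1]
  have hidx : (n - 1).toNat < (solLoopA n [1] 1).length := by omega
  have := helem (n - 1).toNat hidx
  rw [List.getD_eq_getElem _ _ hidx] at this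
  rw [this]
  congr 1
  omega

theorem alt_eval (n : Int) (hn : 0 ≤ n) : solution_alt n = fB n.toNat := by
  unfold solution_alt
  rw [altLoopB_spec n.toNat n 0 1 hn rfl]
  ring

theorem solution_at_zero : solution 0 = 1 := by
  unfold solution
  rw [solLoopA.eq_def]
  norm_num
  decide

theorem alt_at_zero : solution_alt 0 = 0 := by
  unfold solution_alt
  rw [altLoopB]
  norm_num

-- ===== VERDICT (by name: the statement is the Claim_ definition above) =====
theorem solution_spec : Claim_unchanged_solution := by
  intro n _ hpre hd
  have hn1 : 1 ≤ n := by
    rcases lt_or_eq_of_le hpre with h | h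
    · exact h
    · exact absurd h.symm hd
  rw [solution_eval_pos n hn1, alt_eval n (by omega)]

theorem solution_changed : Claim_changed_solution := by
  unfold Claim_changed_solution
  refine ⟨by decide, by decide, by decide, solution_at_zero, alt_at_zero, by decide⟩

theorem solution_tight : Claim_exact_solution := by
  intro n _ _ hd
  rw [hd, solution_at_zero, alt_at_zero]
  decide
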